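-- pv_equiv track=rewrite | github.com/yeynii/python | greedy/greedy_1.py | solution
-- ===== SOURCE A (Python) =====
-- def solution(n, lost, reserve):
--     lost.sort()
--     reserve.sort()
--     i = 0
--     while i < len(lost) :
--         if lost[i] in reserve:
--             reserve.remove(lost[i])
--             lost.pop(i)
--         else:
--             i += 1
--     i = 0
--     while i < len(lost) :
--         if lost[i] in reserve:
--             reserve.remove(lost[i])
--             lost.pop(i)
--         elif (lost[i] - 1) in reserve:
--             reserve.remove(lost[i] - 1)
--             lost.pop(i)
--         elif (lost[i] + 1) in reserve:
--             reserve.remove(lost[i] + 1)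
--             lost.pop(i)
--         else:
--             i += 1
--     answer = n - len(lost)
--     return answer
-- ===== SOURCE B (Python) =====
-- def solution(n, lost, reserve):
--     cl = {}
--     for x in lost:
--         cl[x] = cl.get(x, 0) + 1
--     cr = {}
--     for x in reserve:
--         cr[x] = cr.get(x, 0) + 1
--     avail = {v: c - cl.get(v, 0) for v, c in cr.items()}
--     unmatched = 0
--     for v in sorted(cl):
--         for _ in range(cl[v] - cr.get(v, 0)):
--             if avail.get(v - 1, 0) > 0:
--                 avail[v - 1] -= 1
--             elif avail.get(v + 1, 0) > 0:
--                 avail[v + 1] -= 1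
--             else:
--                 unmatched += 1
--     return n - unmatched
-- ===== Notes on version B (the rewrite author's own statement) =====
-- stated objective: faster
-- what changed: Replaces the two index-based while loops with repeated in-list membership scans and in-place remove/pop by counting dictionaries (multiset difference by counters) plus one greedy pass over the sorted distinct lost sizes, decrementing an availability counter.
import Mathlib
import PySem

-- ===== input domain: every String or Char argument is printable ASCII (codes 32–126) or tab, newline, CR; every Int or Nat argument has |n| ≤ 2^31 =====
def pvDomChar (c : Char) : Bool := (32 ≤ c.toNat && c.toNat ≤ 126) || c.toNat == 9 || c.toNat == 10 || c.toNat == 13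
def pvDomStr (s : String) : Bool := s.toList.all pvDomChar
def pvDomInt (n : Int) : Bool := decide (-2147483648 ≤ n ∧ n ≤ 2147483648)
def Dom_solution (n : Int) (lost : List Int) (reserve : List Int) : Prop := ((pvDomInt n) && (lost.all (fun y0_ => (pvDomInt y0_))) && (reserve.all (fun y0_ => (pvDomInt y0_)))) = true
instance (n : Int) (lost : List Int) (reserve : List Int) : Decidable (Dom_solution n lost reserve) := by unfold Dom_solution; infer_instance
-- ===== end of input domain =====

-- B replaces A's two quadratic while loops (in-list membership scans, in-place remove/pop) by
-- counting dictionaries plus one greedy pass over the sorted distinct lost sizes (faster).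
-- A mutates its `lost`/`reserve` arguments in place (sort/pop/remove); B does not — the
-- equivalence proved here is about the RETURN value only.

-- ===== PORT A =====
-- first while loop of A: exact matches.  `lost.pop(i)` at the guarded index i < len(lost) and
-- `reserve.remove(x)` guarded by `x in reserve` are exact as List.eraseIdx / List.erase
-- (PySem.List.pop?_natCast, PySem.List.remove?_eq_some_erase).
def solLoop1 (i : Nat) (lost reserve : List Int) : List Int × List Int :=
  if h : i < lost.length then
    if lost[i] ∈ reserve then
      solLoop1 i (lost.eraseIdx i) (reserve.erase lost[i])
    else
      solLoop1 (i+1) lost reserve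
  else (lost, reserve)
termination_by lost.length - i
decreasing_by
  · rw [List.length_eraseIdx_of_lt h]; omega
  · omega

-- second while loop of A: exact, then size-1, then size+1
def solLoop2 (i : Nat) (lost reserve : List Int) : List Int × List Int :=
  if h : i < lost.length then
    if lost[i] ∈ reserve then
      solLoop2 i (lost.eraseIdx i) (reserve.erase lost[i])
    else if (lost[i] - 1) ∈ reserve then
      solLoop2 i (lost.eraseIdx i) (reserve.erase (lost[i] - 1))
    else if (lost[i] + 1) ∈ reserve then
      solLoop2 i (lost.eraseIdx i) (reserve.erase (lost[i] + 1))
    else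
      solLoop2 (i+1) lost reserve
  else (lost, reserve)
termination_by lost.length - i
decreasing_by
  · rw [List.length_eraseIdx_of_lt h]; omega
  · rw [List.length_eraseIdx_of_lt h]; omega
  · rw [List.length_eraseIdx_of_lt h]; omega
  · omega

def solution (n : Int) (lost : List Int) (reserve : List Int) : Int :=
  let lost1 := PySem.List.sorted lost (fun x => x) false
  let reserve1 := PySem.List.sorted reserve (fun x => x) false
  let p1 := solLoop1 0 lost1 reserve1
  let p2 := solLoop2 0 p1.1 p1.2
  n - p2.1.length

-- ===== PORT B =====
-- body of B's inner `for _ in range(...)` loop (the loop variable is unused)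
def altInner (v : Int) (st : PySem.Dict Int Int × Int) (_j : Int) : PySem.Dict Int Int × Int :=
  if st.1.getD (v-1) 0 > 0 then (st.1.insert (v-1) (st.1.getD (v-1) 0 - 1), st.2)
  else if st.1.getD (v+1) 0 > 0 then (st.1.insert (v+1) (st.1.getD (v+1) 0 - 1), st.2)
  else (st.1, st.2 + 1)

def solution_alt (n : Int) (lost : List Int) (reserve : List Int) : Int :=
  let cl := lost.foldl (fun d x => d.insert x (d.getD x 0 + 1)) PySem.Dict.empty
  let cr := reserve.foldl (fun d x => d.insert x (d.getD x 0 + 1)) PySem.Dict.empty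
  let avail := cr.items.foldl (fun d p => d.insert p.1 (p.2 - cl.getD p.1 0)) PySem.Dict.empty
  let st := (PySem.List.sorted cl.keys (fun x => x) false).foldl
      (fun st v => (PySem.List.pyRange 0 (cl.getD v 0 - cr.getD v 0) 1).foldl (altInner v) st)
      (avail, 0)
  n - st.2

-- ===== PRECONDITION & SPEC =====
def Spec_solution (n : Int) (lost : List Int) (reserve : List Int) (out : Int) : Prop := out = solution_alt n lost reserve
instance (n : Int) (lost : List Int) (reserve : List Int) (out : Int) : Decidable (Spec_solution n lost reserve out) := by unfold Spec_solution; infer_instance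

-- ===== CLAIM (what is proved, stated in full; the proofs are below) =====
def Claim_equal_solution : Prop := ∀ (n : Int) (lost : List Int) (reserve : List Int), Dom_solution n lost reserve → Spec_solution n lost reserve (solution n lost reserve)

-- ===== LEMMAS AND PROOFS =====

-- abstract spec of A's first loop: scan the lost list, matching exact sizes
def diff1 : List Int → List Int → List Int × List Int
  | [], r => ([], r)
  | x :: xs, r =>
    if x ∈ r then diff1 xs (r.erase x)
    else
      let p := diff1 xs r
      (x :: p.1, p.2)

-- abstract spec of A's second loop: exact, then x-1, then x+1
def diff2 : List Int → List Int → List Int × List Int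
  | [], r => ([], r)
  | x :: xs, r =>
    if x ∈ r then diff2 xs (r.erase x)
    else if (x - 1) ∈ r then diff2 xs (r.erase (x - 1))
    else if (x + 1) ∈ r then diff2 xs (r.erase (x + 1))
    else
      let p := diff2 xs r
      (x :: p.1, p.2)

-- one iteration of B's inner loop, with the (ignored) loop variable fixed
def istep (v : Int) (st : PySem.Dict Int Int × Int) : PySem.Dict Int Int × Int := altInner v st 0

-- the availability dictionary d represents the reserve multiset r
def inv (r : List Int) (d : PySem.Dict Int Int) : Prop :=
  ∀ w : Int, (r.count w : Int) = max (d.getD w 0) 0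

lemma loop1_eq : ∀ (i : Nat) (lost r : List Int), i ≤ lost.length →
    solLoop1 i lost r = (lost.take i ++ (diff1 (lost.drop i) r).1, (diff1 (lost.drop i) r).2) := by
  intro i lost r
  induction i, lost, r using solLoop1.induct with
  | case1 i lost r h hmem ih =>
    intro _
    have he : lost.eraseIdx i = lost.take i ++ lost.drop (i + 1) :=
      List.eraseIdx_eq_take_drop_succ lost i
    have hlen : (lost.take i).length = i := by
      rw [List.length_take]; omega
    have h1 : (lost.eraseIdx i).take i = lost.take i := by
      rw [he, List.take_append, hlen]
      simp [List.take_take]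
    have h2 : (lost.eraseIdx i).drop i = lost.drop (i + 1) := by
      rw [he, List.drop_append, hlen]
      simp [List.drop_of_length_le]
    have hd : lost.drop i = lost[i] :: lost.drop (i + 1) := List.drop_eq_getElem_cons h
    rw [solLoop1, dif_pos h, if_pos hmem]
    rw [ih (by rw [List.length_eraseIdx_of_lt h]; omega)]
    rw [h1, h2, hd]
    simp [diff1, hmem]
  | case2 i lost r h hmem ih =>
    intro _
    have hd : lost.drop i = lost[i] :: lost.drop (i + 1) := List.drop_eq_getElem_cons h
    rw [solLoop1, dif_pos h, if_neg hmem]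
    rw [ih (by omega)]
    rw [hd]
    have ht : lost.take (i + 1) = lost.take i ++ [lost[i]] := by
      rw [List.take_add_one, List.getElem?_eq_getElem h]
      simp
    simp only [diff1, if_neg hmem]
    rw [ht, List.append_assoc, List.singleton_append]
  | case3 i lost r h =>
    intro hle
    have hi : i = lost.length := by omega
    subst hi
    rw [solLoop1, dif_neg h]
    simp [diff1]

lemma loop2_eq : ∀ (i : Nat) (lost r : List Int), i ≤ lost.length →
    solLoop2 i lost r = (lost.take i ++ (diff2 (lost.drop i) r).1, (diff2 (lost.drop i) r).2) := by
  intro i lost r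
  induction i, lost, r using solLoop2.induct with
  | case1 i lost r h hmem ih =>
    intro _
    have he : lost.eraseIdx i = lost.take i ++ lost.drop (i + 1) :=
      List.eraseIdx_eq_take_drop_succ lost i
    have hlen : (lost.take i).length = i := by rw [List.length_take]; omega
    have h1 : (lost.eraseIdx i).take i = lost.take i := by
      rw [he, List.take_append, hlen]; simp [List.take_take]
    have h2 : (lost.eraseIdx i).drop i = lost.drop (i + 1) := by
      rw [he, List.drop_append, hlen]; simp [List.drop_of_length_le]
    have hd : lost.drop i = lost[i] :: lost.drop (i + 1) := List.drop_eq_getElem_cons h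
    rw [solLoop2, dif_pos h, if_pos hmem]
    rw [ih (by rw [List.length_eraseIdx_of_lt h]; omega)]
    rw [h1, h2, hd]
    simp [diff2, hmem]
  | case2 i lost r h hmem hmem1 ih =>
    intro _
    have he : lost.eraseIdx i = lost.take i ++ lost.drop (i + 1) :=
      List.eraseIdx_eq_take_drop_succ lost i
    have hlen : (lost.take i).length = i := by rw [List.length_take]; omega
    have h1 : (lost.eraseIdx i).take i = lost.take i := by
      rw [he, List.take_append, hlen]; simp [List.take_take]
    have h2 : (lost.eraseIdx i).drop i = lost.drop (i + 1) := by
      rw [he, List.drop_append, hlen]; simp [List.drop_of_length_le]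
    have hd : lost.drop i = lost[i] :: lost.drop (i + 1) := List.drop_eq_getElem_cons h
    rw [solLoop2, dif_pos h, if_neg hmem, if_pos hmem1]
    rw [ih (by rw [List.length_eraseIdx_of_lt h]; omega)]
    rw [h1, h2, hd]
    simp [diff2, hmem, hmem1]
  | case3 i lost r h hmem hmem1 hmem2 ih =>
    intro _
    have he : lost.eraseIdx i = lost.take i ++ lost.drop (i + 1) :=
      List.eraseIdx_eq_take_drop_succ lost i
    have hlen : (lost.take i).length = i := by rw [List.length_take]; omega
    have h1 : (lost.eraseIdx i).take i = lost.take i := by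
      rw [he, List.take_append, hlen]; simp [List.take_take]
    have h2 : (lost.eraseIdx i).drop i = lost.drop (i + 1) := by
      rw [he, List.drop_append, hlen]; simp [List.drop_of_length_le]
    have hd : lost.drop i = lost[i] :: lost.drop (i + 1) := List.drop_eq_getElem_cons h
    rw [solLoop2, dif_pos h, if_neg hmem, if_neg hmem1, if_pos hmem2]
    rw [ih (by rw [List.length_eraseIdx_of_lt h]; omega)]
    rw [h1, h2, hd]
    simp [diff2, hmem, hmem1, hmem2]
  | case4 i lost r h hmem hmem1 hmem2 ih =>
    intro _
    have hd : lost.drop i = lost[i] :: lost.drop (i + 1) := List.drop_eq_getElem_cons h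
    rw [solLoop2, dif_pos h, if_neg hmem, if_neg hmem1, if_neg hmem2]
    rw [ih (by omega)]
    rw [hd]
    have ht : lost.take (i + 1) = lost.take i ++ [lost[i]] := by
      rw [List.take_add_one, List.getElem?_eq_getElem h]
      simp
    simp only [diff2, if_neg hmem, if_neg hmem1, if_neg hmem2]
    rw [ht, List.append_assoc, List.singleton_append]
  | case5 i lost r h =>
    intro hle
    have hi : i = lost.length := by omega
    subst hi
    rw [solLoop2, dif_neg h]
    simp [diff2]

lemma diff1_count1 : ∀ (l r : List Int) (v : Int),
    ((diff1 l r).1.count v : Int) = max ((l.count v : Int) - (r.count v : Int)) 0 := by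
  intro l
  induction l with
  | nil => intro r v; simp [diff1]
  | cons x xs ih =>
    intro r v
    by_cases hm : x ∈ r
    · have hc : 0 < r.count x := List.count_pos_iff.2 hm
      simp only [diff1, if_pos hm]
      have h' := ih (r.erase x) v
      by_cases hvx : v = x
      · subst hvx
        rw [List.count_erase_self] at h'
        rw [List.count_cons_self]
        omega
      · rw [List.count_erase_of_ne hvx] at h'
        rw [List.count_cons_of_ne (Ne.symm hvx)]
        omega
    · have hc : r.count x = 0 := List.count_eq_zero.2 hm
      simp only [diff1]
      rw [if_neg hm]
      have h' := ih r v
      by_cases hvx : v = x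
      · subst hvx
        simp only [List.count_cons_self]
        omega
      · simp only [List.count_cons_of_ne (Ne.symm hvx)]
        omega

lemma diff1_count2 : ∀ (l r : List Int) (v : Int),
    ((diff1 l r).2.count v : Int) = max ((r.count v : Int) - (l.count v : Int)) 0 := by
  intro l
  induction l with
  | nil => intro r v; simp [diff1]
  | cons x xs ih =>
    intro r v
    by_cases hm : x ∈ r
    · have hc : 0 < r.count x := List.count_pos_iff.2 hm
      simp only [diff1, if_pos hm]
      have h' := ih (r.erase x) v
      by_cases hvx : v = x
      · subst hvx
        rw [List.count_erase_self] at h'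
        rw [List.count_cons_self]
        omega
      · rw [List.count_erase_of_ne hvx] at h'
        rw [List.count_cons_of_ne (Ne.symm hvx)]
        omega
    · have hc : r.count x = 0 := List.count_eq_zero.2 hm
      simp only [diff1]
      rw [if_neg hm]
      have h' := ih r v
      by_cases hvx : v = x
      · subst hvx
        simp only [List.count_cons_self]
        omega
      · simp only [List.count_cons_of_ne (Ne.symm hvx)]
        omega

lemma diff1_sublist : ∀ (l r : List Int), (diff1 l r).1.Sublist l := by
  intro l
  induction l with
  | nil => intro r; simp [diff1]
  | cons x xs ih =>
    intro r
    by_cases hm : x ∈ r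
    · simp only [diff1, if_pos hm]
      exact (ih _).cons _
    · simp only [diff1]
      rw [if_neg hm]
      exact (ih _).cons₂ _

lemma foldl_ignore (v : Int) (xs : List Int) : ∀ st : PySem.Dict Int Int × Int,
    xs.foldl (altInner v) st = (istep v)^[xs.length] st := by
  induction xs with
  | nil => intro st; rfl
  | cons x xs ih =>
    intro st
    simp only [List.foldl_cons, List.length_cons, Function.iterate_succ_apply]
    exact ih _

lemma greedy_inner (k : Nat) : ∀ (v : Int) (rest r : List Int) (d : PySem.Dict Int Int) (u : Int),
    inv r d → v ∉ r →
    ∃ r', inv r' ((istep v)^[k] (d, u)).1 ∧ (∀ x, x ∈ r' → x ∈ r) ∧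
      ((diff2 (List.replicate k v ++ rest) r).1.length : Int) + u
        = ((diff2 rest r').1.length : Int) + ((istep v)^[k] (d, u)).2 := by
  induction k with
  | zero =>
    intro v rest r d u hinv hv
    exact ⟨r, hinv, fun x hx => hx, by simp⟩
  | succ k ih =>
    intro v rest r d u hinv hv
    rw [List.replicate_succ, List.cons_append, Function.iterate_succ_apply]
    by_cases hb1 : 0 < d.getD (v - 1) 0
    · have hm1 : (v - 1) ∈ r := by
        rw [← List.count_pos_iff]
        have := hinv (v - 1); omega
      have hstep : istep v (d, u) = (d.insert (v - 1) (d.getD (v - 1) 0 - 1), u) := by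
        simp [istep, altInner, hb1]
      have hinv' : inv (r.erase (v - 1)) (d.insert (v - 1) (d.getD (v - 1) 0 - 1)) := by
        intro w
        by_cases hw : w = v - 1
        · subst hw
          rw [List.count_erase_self, PySem.Dict.getD_insert_self]
          have := hinv (v - 1)
          have hcp : 0 < r.count (v - 1) := List.count_pos_iff.2 hm1
          omega
        · rw [List.count_erase_of_ne hw, PySem.Dict.getD_insert, if_neg hw]
          exact hinv w
      have hv' : v ∉ r.erase (v - 1) := fun hx => hv (List.mem_of_mem_erase hx)
      obtain ⟨r', hi, hs, heq⟩ := ih v rest (r.erase (v - 1)) _ u hinv' hv'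
      rw [hstep]
      refine ⟨r', hi, fun x hx => List.erase_subset (hs x hx), ?_⟩
      have hd2 : diff2 (v :: (List.replicate k v ++ rest)) r
          = diff2 (List.replicate k v ++ rest) (r.erase (v - 1)) := by
        simp [diff2, hv, hm1]
      rw [hd2]
      exact heq
    · have hnm1 : (v - 1) ∉ r := by
        intro hx
        have := hinv (v - 1)
        have := List.count_pos_iff.2 hx
        omega
      by_cases hb2 : 0 < d.getD (v + 1) 0
      · have hm2 : (v + 1) ∈ r := by
          rw [← List.count_pos_iff]
          have := hinv (v + 1); omega
        have hstep : istep v (d, u) = (d.insert (v + 1) (d.getD (v + 1) 0 - 1), u) := by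
          simp [istep, altInner, hb1, hb2]
        have hinv' : inv (r.erase (v + 1)) (d.insert (v + 1) (d.getD (v + 1) 0 - 1)) := by
          intro w
          by_cases hw : w = v + 1
          · subst hw
            rw [List.count_erase_self, PySem.Dict.getD_insert_self]
            have := hinv (v + 1)
            have hcp : 0 < r.count (v + 1) := List.count_pos_iff.2 hm2
            omega
          · rw [List.count_erase_of_ne hw, PySem.Dict.getD_insert, if_neg hw]
            exact hinv w
        have hv' : v ∉ r.erase (v + 1) := fun hx => hv (List.mem_of_mem_erase hx)
        obtain ⟨r', hi, hs, heq⟩ := ih v rest (r.erase (v + 1)) _ u hinv' hv'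
        rw [hstep]
        refine ⟨r', hi, fun x hx => List.erase_subset (hs x hx), ?_⟩
        have hd2 : diff2 (v :: (List.replicate k v ++ rest)) r
            = diff2 (List.replicate k v ++ rest) (r.erase (v + 1)) := by
          simp [diff2, hv, hnm1, hm2]
        rw [hd2]
        exact heq
      · have hnm2 : (v + 1) ∉ r := by
          intro hx
          have := hinv (v + 1)
          have := List.count_pos_iff.2 hx
          omega
        have hstep : istep v (d, u) = (d, u + 1) := by
          simp [istep, altInner, hb1, hb2]
        obtain ⟨r', hi, hs, heq⟩ := ih v rest r d (u + 1) hinv hv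
        rw [hstep]
        refine ⟨r', hi, hs, ?_⟩
        have hd2 : diff2 (v :: (List.replicate k v ++ rest)) r
            = (v :: (diff2 (List.replicate k v ++ rest) r).1,
               (diff2 (List.replicate k v ++ rest) r).2) := by
          simp [diff2, hv, hnm1, hnm2]
        rw [hd2]
        simp only [List.length_cons]
        omega

lemma greedy_main (vs : List Int) : ∀ (c : Int → Int) (r : List Int) (d : PySem.Dict Int Int) (u : Int),
    inv r d → (∀ v ∈ vs, 0 < c v → v ∉ r) →
    (vs.foldl (fun st v => (PySem.List.pyRange 0 (c v) 1).foldl (altInner v) st) (d, u)).2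
      = u + ((diff2 (vs.flatMap (fun v => List.replicate (c v).toNat v)) r).1.length : Int) := by
  induction vs with
  | nil =>
    intro c r d u _ _
    simp [diff2]
  | cons v vs ih =>
    intro c r d u hinv hnot
    simp only [List.foldl_cons, List.flatMap_cons]
    rw [foldl_ignore, PySem.List.length_pyRange_one]
    rw [show ((c v) - 0).toNat = (c v).toNat by rw [sub_zero]]
    by_cases hc : 0 < c v
    · have hv : v ∉ r := hnot v (List.mem_cons_self ..) hc
      obtain ⟨r', hi, hs, heq⟩ :=
        greedy_inner (c v).toNat v (vs.flatMap (fun v => List.replicate (c v).toNat v)) r d u hinv hv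
      have ihres := ih c r' ((istep v)^[(c v).toNat] (d, u)).1 ((istep v)^[(c v).toNat] (d, u)).2
        hi (fun v' hv' hc' hx => hnot v' (List.mem_cons_of_mem _ hv') hc' (hs _ hx))
      rw [Prod.mk.eta] at ihres
      omega
    · have h0 : (c v).toNat = 0 := Int.toNat_eq_zero.2 (not_lt.1 hc)
      rw [h0]
      simp only [Function.iterate_zero, id_eq, List.replicate_zero, List.nil_append]
      exact ih c r d u hinv (fun v' hv' => hnot v' (List.mem_cons_of_mem _ hv'))

lemma count_sorted (xs : List Int) (v : Int) :
    (PySem.List.sorted xs (fun x => x) false).count v = xs.count v :=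
  (PySem.List.sorted_perm xs (fun x => x) false).count_eq v

lemma foldl_insert_fun_getD (ks : List Int) (g : Int → Int) (w : Int) :
    ∀ d : PySem.Dict Int Int,
      (ks.foldl (fun d k => d.insert k (g k)) d).getD w 0
        = if w ∈ ks then g w else d.getD w 0 := by
  induction ks with
  | nil => intro d; simp
  | cons k ks ih =>
    intro d
    simp only [List.foldl_cons, ih, List.mem_cons]
    by_cases hw : w ∈ ks
    · simp [hw]
    · by_cases hk : w = k
      · subst hk
        simp [hw, PySem.Dict.getD_insert_self]
      · simp [hw, hk, PySem.Dict.getD_insert]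

lemma avail_getD (lost reserve : List Int) (w : Int) :
    ((PySem.Dict.counter reserve).items.foldl
        (fun d (p : Int × Int) => d.insert p.1 (p.2 - (lost.count p.1 : Int)))
        PySem.Dict.empty).getD w 0
      = if w ∈ reserve then (reserve.count w : Int) - (lost.count w : Int) else 0 := by
  rw [PySem.Dict.items_counter]
  simp only [List.foldl_map]
  rw [foldl_insert_fun_getD (PySem.Set.ofList reserve)
      (fun k => (reserve.count k : Int) - (lost.count k : Int)) w PySem.Dict.empty]
  by_cases hw : w ∈ reserve
  · rw [if_pos ((PySem.Set.mem_ofList reserve w).2 hw), if_pos hw]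
  · rw [if_neg (fun hx => hw ((PySem.Set.mem_ofList reserve w).1 hx)), if_neg hw]
    simp

lemma flatMap_replicate_count (vs : List Int) (f : Int → Nat) (w : Int) (h : vs.Nodup) :
    (vs.flatMap (fun v => List.replicate (f v) v)).count w = if w ∈ vs then f w else 0 := by
  induction vs with
  | nil => simp
  | cons v vs ih =>
    simp only [List.flatMap_cons, List.count_append, List.mem_cons]
    rw [ih h.of_cons]
    by_cases hwv : w = v
    · subst hwv
      have : w ∉ vs := (List.nodup_cons.1 h).1
      simp [this]
    · have hvw : v ≠ w := Ne.symm hwv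
      by_cases hw : w ∈ vs
      · simp [hw, hwv, hvw, List.count_replicate]
      · simp [hw, hwv, hvw, List.count_replicate]

lemma flatMap_replicate_pairwise (vs : List Int) (f : Int → Nat) (h : vs.Pairwise (· < ·)) :
    (vs.flatMap (fun v => List.replicate (f v) v)).Pairwise (· ≤ ·) := by
  induction vs with
  | nil => simp
  | cons v vs ih =>
    simp only [List.flatMap_cons]
    rw [List.pairwise_append]
    refine ⟨?_, ih (List.pairwise_cons.1 h).2, ?_⟩
    · exact List.pairwise_replicate.2 (Or.inr le_rfl)
    · intro a ha b hb
      have hav : a = v := (List.mem_replicate.1 ha).2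
      obtain ⟨y, hy, hb'⟩ := List.mem_flatMap.1 hb
      have hbv : b = y := (List.mem_replicate.1 hb').2
      have hlt : v < y := (List.pairwise_cons.1 h).1 y hy
      rw [hav, hbv]
      exact hlt.le

lemma expansion_eq (lost reserve : List Int) :
    (PySem.List.sorted (PySem.Set.ofList lost) (fun x => x) false).flatMap
        (fun v => List.replicate ((lost.count v : Int) - (reserve.count v : Int)).toNat v)
      = (diff1 (PySem.List.sorted lost (fun x => x) false)
               (PySem.List.sorted reserve (fun x => x) false)).1 := by
  have hvs : (PySem.List.sorted (PySem.Set.ofList lost) (fun x => x) false).Pairwise (· < ·) :=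
    PySem.List.sorted_ofList_pairwise_lt lost
  have hnd : (PySem.List.sorted (PySem.Set.ofList lost) (fun x => x) false).Nodup :=
    hvs.imp Int.ne_of_lt
  have hpL : ((PySem.List.sorted (PySem.Set.ofList lost) (fun x => x) false).flatMap
      (fun v => List.replicate ((lost.count v : Int) - (reserve.count v : Int)).toNat v)).Pairwise
      (· ≤ ·) := flatMap_replicate_pairwise _ _ hvs
  have hpR : (diff1 (PySem.List.sorted lost (fun x => x) false)
      (PySem.List.sorted reserve (fun x => x) false)).1.Pairwise (· ≤ ·) := by
    have hp : (PySem.List.sorted lost (fun x => x) false).Pairwise (· ≤ ·) := by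
      have := PySem.List.sorted_pairwise lost (fun x => x)
      simpa using this
    exact List.Pairwise.sublist (diff1_sublist _ _) hp
  have hperm : ((PySem.List.sorted (PySem.Set.ofList lost) (fun x => x) false).flatMap
      (fun v => List.replicate ((lost.count v : Int) - (reserve.count v : Int)).toNat v)).Perm
      (diff1 (PySem.List.sorted lost (fun x => x) false)
             (PySem.List.sorted reserve (fun x => x) false)).1 := by
    rw [List.perm_iff_count]
    intro w
    rw [flatMap_replicate_count _ _ _ hnd]
    have hcnt : ((diff1 (PySem.List.sorted lost (fun x => x) false)
        (PySem.List.sorted reserve (fun x => x) false)).1.count w : Int)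
        = max ((lost.count w : Int) - (reserve.count w : Int)) 0 := by
      rw [diff1_count1, count_sorted, count_sorted]
    by_cases hw : w ∈ lost
    · have hmm : w ∈ PySem.List.sorted (PySem.Set.ofList lost) (fun x => x) false := by
        rw [PySem.List.mem_sorted]
        exact (PySem.Set.mem_ofList lost w).2 hw
      rw [if_pos hmm]
      omega
    · have hnm : w ∉ PySem.List.sorted (PySem.Set.ofList lost) (fun x => x) false := by
        rw [PySem.List.mem_sorted]
        exact fun hx => hw ((PySem.Set.mem_ofList lost w).1 hx)
      rw [if_neg hnm]
      have : lost.count w = 0 := List.count_eq_zero.2 hw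
      omega
  have h1 := PySem.List.sorted_id_eq_of_perm_of_pairwise _ _ (List.Perm.refl _) hpR
  have h2 := PySem.List.sorted_id_eq_of_perm_of_pairwise _ _ hperm hpL
  exact h2.symm.trans h1

lemma solution_eq_spec (n : Int) (lost reserve : List Int) :
    solution n lost reserve =
      n - ((diff2 (diff1 (PySem.List.sorted lost (fun x => x) false)
                         (PySem.List.sorted reserve (fun x => x) false)).1
                  (diff1 (PySem.List.sorted lost (fun x => x) false)
                         (PySem.List.sorted reserve (fun x => x) false)).2).1.length : Int) := by
  simp only [solution]
  rw [loop1_eq 0 _ _ (Nat.zero_le _)]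
  simp only [List.take_zero, List.drop_zero, List.nil_append]
  rw [loop2_eq 0 _ _ (Nat.zero_le _)]
  simp only [List.take_zero, List.drop_zero, List.nil_append]

lemma solution_alt_eq_spec (n : Int) (lost reserve : List Int) :
    solution_alt n lost reserve =
      n - ((diff2 (diff1 (PySem.List.sorted lost (fun x => x) false)
                         (PySem.List.sorted reserve (fun x => x) false)).1
                  (diff1 (PySem.List.sorted lost (fun x => x) false)
                         (PySem.List.sorted reserve (fun x => x) false)).2).1.length : Int) := by
  simp only [solution_alt]
  rw [PySem.Dict.foldl_insert_getD_add_one_eq_counter,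
      PySem.Dict.foldl_insert_getD_add_one_eq_counter]
  simp only [PySem.Dict.getD_counter, PySem.Dict.keys_counter]
  have hinv : inv (diff1 (PySem.List.sorted lost (fun x => x) false)
                         (PySem.List.sorted reserve (fun x => x) false)).2
      ((PySem.Dict.counter reserve).items.foldl
        (fun d (p : Int × Int) => d.insert p.1 (p.2 - (lost.count p.1 : Int)))
        PySem.Dict.empty) := by
    intro w
    rw [diff1_count2, count_sorted, count_sorted, avail_getD]
    by_cases hw : w ∈ reserve
    · rw [if_pos hw]
    · rw [if_neg hw]
      have : reserve.count w = 0 := List.count_eq_zero.2 hw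
      omega
  have hnot : ∀ v ∈ PySem.List.sorted (PySem.Set.ofList lost) (fun x => x) false,
      0 < (lost.count v : Int) - (reserve.count v : Int) →
      v ∉ (diff1 (PySem.List.sorted lost (fun x => x) false)
                 (PySem.List.sorted reserve (fun x => x) false)).2 := by
    intro v _ hc hx
    have hcp := List.count_pos_iff.2 hx
    have := diff1_count2 (PySem.List.sorted lost (fun x => x) false)
      (PySem.List.sorted reserve (fun x => x) false) v
    rw [count_sorted, count_sorted] at this
    omega
  rw [greedy_main (PySem.List.sorted (PySem.Set.ofList lost) (fun x => x) false)
      (fun v => (lost.count v : Int) - (reserve.count v : Int)) _ _ _ hinv hnot]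
  rw [expansion_eq]
  simp

-- ===== VERDICT (by name: the statement is the Claim_ definition above) =====
theorem solution_spec : Claim_equal_solution := by
  intro n lost reserve _
  unfold Spec_solution
  rw [solution_eq_spec, solution_alt_eq_spec]
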